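-- pv_equiv track=rewrite | github.com/Yaseen549/pygrams | pygrams/generators.py | generate_even_numbers
-- ===== SOURCE A (Python) =====
-- def generate_even_numbers(start, end, inclusive_end=False):
--     """
--     Generates a list of even numbers within a specified range.
--
--     Parameters:
--     - start (int): The starting number of the range (inclusive).
--     - end (int): The ending number of the range.
--     - inclusive_end (bool): If True, includes the end number in the range; otherwise, it is exclusive.
--       Defaults to False.
--
--     Returns:
--     - list[int]: A list of even numbers within the specified range.
--
--     Raises:
--     - ValueError: If start is greater than end.
--
--     Examples:
--     >>> generate_even_numbers(1, 10)
--     [2, 4, 6, 8]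
--     >>> generate_even_numbers(1, 10, inclusive_end=True)
--     [2, 4, 6, 8, 10]
--     """
--     if not isinstance(start, int) or not isinstance(end, int):
--         raise TypeError("Start and end values must be integers.")
--     if start > end:
--         raise ValueError("Start value cannot be greater than end value.")
--
--     if inclusive_end:
--         end += 1
--     return [num for num in range(start, end) if num % 2 == 0]
-- ===== SOURCE B (Python) =====
-- def generate_even_numbers(start, end, inclusive_end=False):
--     if not isinstance(start, int) or not isinstance(end, int):
--         raise TypeError("Start and end values must be integers.")
--     if start > end:
--         raise ValueError("Start value cannot be greater than end value.")
--     stop = end + 1 if inclusive_end else end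
--     first = start + start % 2
--     n = max(0, (stop - first + 1) // 2)
--     return [first + 2 * i for i in range(n)]
-- ===== Notes on version B (the rewrite author's own statement) =====
-- stated objective: alternative
-- what changed: B computes the count of even numbers in the range by a closed-form floor division and materialises the result as [first + 2*i for i in range(n)], instead of scanning every integer in range(start, end) and filtering with num % 2 == 0.
import Mathlib
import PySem

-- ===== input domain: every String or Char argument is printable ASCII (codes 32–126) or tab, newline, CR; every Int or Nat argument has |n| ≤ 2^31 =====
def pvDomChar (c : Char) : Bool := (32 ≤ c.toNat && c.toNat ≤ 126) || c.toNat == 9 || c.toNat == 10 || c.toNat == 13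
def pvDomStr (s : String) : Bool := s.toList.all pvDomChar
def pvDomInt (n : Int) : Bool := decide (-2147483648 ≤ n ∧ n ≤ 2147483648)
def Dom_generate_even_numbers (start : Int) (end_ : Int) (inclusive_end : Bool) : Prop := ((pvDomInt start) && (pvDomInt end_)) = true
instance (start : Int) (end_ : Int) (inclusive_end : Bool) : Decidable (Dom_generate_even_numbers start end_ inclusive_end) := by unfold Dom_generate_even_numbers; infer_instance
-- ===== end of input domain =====

-- B replaces A's scan-and-filter over range(start, end) by a closed-form count of evens and a comprehension [first + 2*i for i in range(n)] (alternative decomposition).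
-- Pre_ excludes start > end, where the Python A raises ValueError (B raises there too).


-- ===== PORT A =====
def generate_even_numbers (start : Int) (end_ : Int) (inclusive_end : Bool) : List Int :=
  let end_ := if inclusive_end then end_ + 1 else end_
  (PySem.List.pyRange start end_ 1).filter (fun num => PySem.Int.mod num 2 == 0)

-- ===== PORT B =====
def generate_even_numbers_alt (start : Int) (end_ : Int) (inclusive_end : Bool) : List Int :=
  let stop := if inclusive_end then end_ + 1 else end_
  let first := start + PySem.Int.mod start 2
  let n := max 0 (PySem.Int.floordiv (stop - first + 1) 2)
  (List.range n.toNat).map (fun i : Nat => first + 2 * (i : Int))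

-- ===== PRECONDITION & SPEC =====
-- A raises ValueError when start > end; Pre_ excludes exactly those inputs.
def Pre_generate_even_numbers (start : Int) (end_ : Int) (inclusive_end : Bool) : Prop := start ≤ end_
instance (start : Int) (end_ : Int) (inclusive_end : Bool) : Decidable (Pre_generate_even_numbers start end_ inclusive_end) := by unfold Pre_generate_even_numbers; infer_instance
def pvWitness_generate_even_numbers : Int × Int × Bool := (1, 10, false)
def Spec_generate_even_numbers (start : Int) (end_ : Int) (inclusive_end : Bool) (out : List Int) : Prop := out = generate_even_numbers_alt start end_ inclusive_end
instance (start : Int) (end_ : Int) (inclusive_end : Bool) (out : List Int) : Decidable (Spec_generate_even_numbers start end_ inclusive_end out) := by unfold Spec_generate_even_numbers; infer_instance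

-- ===== CLAIM (what is proved, stated in full; the proofs are below) =====
def Claim_equal_generate_even_numbers : Prop := ∀ (start : Int) (end_ : Int) (inclusive_end : Bool), Dom_generate_even_numbers start end_ inclusive_end → Pre_generate_even_numbers start end_ inclusive_end → Spec_generate_even_numbers start end_ inclusive_end (generate_even_numbers start end_ inclusive_end)

-- ===== LEMMAS AND PROOFS =====

-- The filtered unit-step range equals the comprehension over the closed-form count, for any bounds.
theorem evens_range_eq (a b : Int) :
    (PySem.List.pyRange a b 1).filter (fun num => PySem.Int.mod num 2 == 0)
      = (List.range (max 0 (PySem.Int.floordiv (b - (a + PySem.Int.mod a 2) + 1) 2)).toNat).map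
          (fun i : Nat => (a + PySem.Int.mod a 2) + 2 * (i : Int)) := by
  have hmod : ∀ x : Int, PySem.Int.mod x 2 = x % 2 :=
    fun x => PySem.Int.mod_eq_emod_of_pos (by norm_num)
  have hdiv : PySem.Int.floordiv (b - (a + PySem.Int.mod a 2) + 1) 2
      = (b - (a + PySem.Int.mod a 2) + 1) / 2 :=
    PySem.Int.floordiv_eq_ediv_of_pos (by norm_num)
  set f := a + PySem.Int.mod a 2 with hf
  -- rewrite the step-2 range as the comprehension
  have hrange : PySem.List.pyRange f b 2
      = (List.range (max 0 (PySem.Int.floordiv (b - f + 1) 2)).toNat).map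
          (fun i : Nat => f + 2 * (i : Int)) := by
    rw [PySem.List.pyRange_of_pos f b (by norm_num : (0:Int) < 2), hdiv]
    have hcount : (if f < b then ((b - f + 2 - 1) / 2).toNat else 0)
        = (max 0 ((b - f + 1) / 2)).toNat := by
      split_ifs with h <;> omega
    rw [hcount]
  rw [← hrange]
  -- filtered unit range = step-2 range: both strictly sorted with the same members
  have hsort1 : ((PySem.List.pyRange a b 1).filter
      (fun num => PySem.Int.mod num 2 == 0)).Pairwise (· < ·) :=
    (PySem.List.pairwise_lt_pyRange_one a b).filter _
  have hsort2 : (PySem.List.pyRange f b 2).Pairwise (· < ·) := by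
    rw [PySem.List.pyRange_of_pos _ _ (by norm_num : (0:Int) < 2)]
    rw [List.pairwise_map]
    exact List.pairwise_lt_range.imp (by intro i j h; omega)
  have hmem : ∀ x : Int,
      x ∈ (PySem.List.pyRange a b 1).filter (fun num => PySem.Int.mod num 2 == 0) ↔
      x ∈ PySem.List.pyRange f b 2 := by
    intro x
    rw [List.mem_filter, PySem.List.mem_pyRange_one,
      PySem.List.mem_pyRange_iff_of_pos (by norm_num : (0:Int) < 2)]
    simp only [hmod, beq_iff_eq, hf]
    constructor
    · rintro ⟨⟨h1, h2⟩, h3⟩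
      exact ⟨by omega, h2, by omega⟩
    · rintro ⟨h1, h2, h3⟩
      exact ⟨⟨by omega, h2⟩, by omega⟩
  exact List.Perm.eq_of_pairwise (fun a b _ _ h1 h2 => absurd h2 (not_lt_of_gt h1))
    hsort1 hsort2
    ((List.perm_ext_iff_of_nodup (hsort1.imp fun h => ne_of_lt h)
      (hsort2.imp fun h => ne_of_lt h)).mpr hmem)

-- ===== VERDICT (by name: the statement is the Claim_ definition above) =====
theorem generate_even_numbers_spec : Claim_equal_generate_even_numbers := by
  intro start end_ inclusive_end _ _
  unfold Spec_generate_even_numbers generate_even_numbers generate_even_numbers_alt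
  exact evens_range_eq start (if inclusive_end then end_ + 1 else end_)
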